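-- pv_equiv track=rewrite | github.com/Sergii-Kravets/Learn-Python | 01_Parser-and-statistics/Done-task/carrots/all_done.py | number_of_nucleotides
-- ===== SOURCE A (Python) =====
-- from collections import Counter
--
-- def number_of_nucleotides(data):
--     gen = None
--     genes = {}
--     for dna in data:
--         if '>' in dna:
--             gen = dna[1:]
--             genes[gen] = Counter()
--         else:
--             for simvol in dna:
--                 genes[gen][simvol] +=1
--     return genes
-- ===== SOURCE B (Python) =====
-- from collections import Counter
--
-- def number_of_nucleotides(data):
--     # Segment the input at header lines, then count each segment at once:
--     # no running 'gen' state and no per-character dict increments.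
--     n = len(data)
--     k = 0
--     while k < n and '>' not in data[k]:
--         k += 1  # preamble before the first header; A raises KeyError on a non-empty line here
--     segs = []
--     while k < n:
--         j = k + 1
--         while j < n and '>' not in data[j]:
--             j += 1
--         segs.append((data[k][1:], ''.join(data[k + 1:j])))
--         k = j
--     return {g: Counter(s) for g, s in segs}
-- ===== Notes on version B (the rewrite author's own statement) =====
-- stated objective: alternative
-- what changed: B replaces A's single-pass state machine (a current-gene variable plus per-character dict increments into nested Counters) by index-based segmentation: it scans for header positions, extracts each gene's whole block by slicing/joining, and builds the result with one Counter call per segment in a dict comprehension.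
import Mathlib
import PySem

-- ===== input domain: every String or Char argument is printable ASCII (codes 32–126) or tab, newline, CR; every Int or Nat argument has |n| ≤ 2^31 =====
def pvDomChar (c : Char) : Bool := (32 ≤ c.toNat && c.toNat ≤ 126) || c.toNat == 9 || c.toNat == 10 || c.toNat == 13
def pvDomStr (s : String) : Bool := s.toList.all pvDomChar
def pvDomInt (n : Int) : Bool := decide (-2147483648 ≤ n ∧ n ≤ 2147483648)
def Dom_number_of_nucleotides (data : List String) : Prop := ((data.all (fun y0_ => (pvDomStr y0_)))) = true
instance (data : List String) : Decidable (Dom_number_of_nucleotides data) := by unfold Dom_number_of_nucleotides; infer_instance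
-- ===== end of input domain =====

-- B segments the input at header lines and counts each gene's whole block with one
-- Counter call, instead of A's per-line state machine with per-character increments
-- (alternative decomposition, same cost).


-- a Python character, as the 1-character string Counter keys become under the type convention
def pvSing (c : Char) : String := String.ofList [c]

-- ===== PORT A =====
-- per-line step of A's loop: state = (gen, genes); 'genes[gen][simvol] += 1' looks the
-- counter up and writes it back (overwrite keeps position = in-place mutation);
-- the 'none' fallbacks are where Python raises KeyError (excluded by Pre_)
def pvStepA (st : Option String × PySem.Dict String (PySem.Dict String Int)) (dna : String) :
    Option String × PySem.Dict String (PySem.Dict String Int) :=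
  if PySem.Str.isIn ">" dna then
    let g := PySem.Str.slice dna (some 1) none
    (some g, st.2.insert g PySem.Dict.empty)
  else
    (st.1, dna.toList.foldl (fun genes simvol =>
        match st.1 with
        | some g =>
          match genes.get? g with
          | some cnt => genes.insert g (cnt.modify (pvSing simvol) 0 (· + 1))
          | none => genes     -- KeyError in Python
        | none => genes       -- KeyError in Python
      ) st.2)

def number_of_nucleotides (data : List String) : List (String × List (String × Int)) :=
  ((data.foldl pvStepA (none, PySem.Dict.empty)).2.items).map (fun p => (p.1, p.2.items))

-- ===== PORT B =====
-- '>' not in line  (the loop guards of B's while loops)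
def pvNoHdr (l : String) : Bool := !(PySem.Str.isIn ">" l)

-- B's middle while loop, as the obvious structural recursion on the remaining suffix
-- (each iteration consumes the header at position k and scans with j to the next header):
-- it yields the list 'segs' of (gene name, joined chunk characters)
def pvSegments : List String → List (String × List Char)
  | [] => []
  | h :: rest =>
    (PySem.Str.slice h (some 1) none, ((rest.takeWhile pvNoHdr).map String.toList).flatten)
      :: pvSegments (rest.dropWhile pvNoHdr)
termination_by data => data.length
decreasing_by
  have := (List.dropWhile_sublist (l := rest) (p := pvNoHdr)).length_le
  simp; omega

-- the dict comprehension {g: Counter(s) for g, s in segs}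
def number_of_nucleotides_alt (data : List String) : List (String × List (String × Int)) :=
  (((pvSegments (data.dropWhile pvNoHdr)).foldl
      (fun d p => d.insert p.1 (PySem.Dict.counter (p.2.map pvSing)))
      PySem.Dict.empty).items).map (fun p => (p.1, p.2.items))

-- ===== PRECONDITION & SPEC =====
-- Pre_ excludes exactly the inputs where Python raises KeyError: a non-empty line with
-- no '>' occurring before the first header line.
def Pre_number_of_nucleotides (data : List String) : Prop :=
  ((data.takeWhile (fun l => !(PySem.Str.isIn ">" l))).all (fun l => l == "")) = true
instance (data : List String) : Decidable (Pre_number_of_nucleotides data) := by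
  unfold Pre_number_of_nucleotides; infer_instance
def pvWitness_number_of_nucleotides : List String := [">g1", "ACGT", ">g2", "", "AC"]

def Spec_number_of_nucleotides (data : List String) (out : List (String × List (String × Int))) : Prop := out = number_of_nucleotides_alt data
instance (data : List String) (out : List (String × List (String × Int))) : Decidable (Spec_number_of_nucleotides data out) := by unfold Spec_number_of_nucleotides; infer_instance

-- ===== CLAIM (what is proved, stated in full; the proofs are below) =====
def Claim_equal_number_of_nucleotides : Prop := ∀ (data : List String), Dom_number_of_nucleotides data → Pre_number_of_nucleotides data → Spec_number_of_nucleotides data (number_of_nucleotides data)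

-- ===== LEMMAS AND PROOFS =====

-- the per-character counter update of A, and B's per-segment dict insertion
def pvChar (cnt : PySem.Dict String Int) (c : Char) : PySem.Dict String Int :=
  cnt.modify (pvSing c) 0 (· + 1)
def pvIns (d : PySem.Dict String (PySem.Dict String Int)) (p : String × List Char) :
    PySem.Dict String (PySem.Dict String Int) :=
  d.insert p.1 (PySem.Dict.counter (p.2.map pvSing))

-- A's inner character loop starting from a state whose gene entry was just written:
-- it is one overwrite with the counter folded over the characters
theorem pvInnerA (g : String) (chars : List Char)
    (genes : PySem.Dict String (PySem.Dict String Int)) (cnt : PySem.Dict String Int) :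
    chars.foldl (fun genes simvol =>
        match genes.get? g with
        | some cnt => genes.insert g (cnt.modify (pvSing simvol) 0 (· + 1))
        | none => genes) (genes.insert g cnt)
      = genes.insert g (chars.foldl pvChar cnt) := by
  induction chars generalizing cnt with
  | nil => rfl
  | cons c cs ih =>
    simp only [List.foldl_cons, PySem.Dict.get?_insert_self]
    rw [PySem.Dict.insert_insert_self]
    exact ih _

-- A's loop over a run of non-header lines: all their characters go into gene g's counter
theorem pvChunkA (seg : List String) (hseg : ∀ l ∈ seg, pvNoHdr l = true)
    (g : String) (genes : PySem.Dict String (PySem.Dict String Int))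
    (cnt : PySem.Dict String Int) :
    seg.foldl pvStepA (some g, genes.insert g cnt)
      = (some g, genes.insert g ((seg.map String.toList).flatten.foldl pvChar cnt)) := by
  induction seg generalizing cnt with
  | nil => rfl
  | cons l ls ih =>
    have hl : PySem.Str.isIn ">" l = false := by
      have := hseg l (List.mem_cons_self ..); simpa [pvNoHdr] using this
    simp only [List.foldl_cons, List.map_cons, List.flatten_cons, List.foldl_append]
    rw [show pvStepA (some g, genes.insert g cnt) l
        = (some g, genes.insert g (l.toList.foldl pvChar cnt)) by
      simp only [pvStepA, hl, Bool.false_eq_true, if_false]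
      exact congrArg _ (pvInnerA g l.toList genes cnt)]
    exact ih (fun x hx => hseg x (List.mem_cons_of_mem _ hx)) _

-- MAIN INVARIANT: from a state that just opened gene g, A's remaining loop produces the
-- dict obtained by inserting one finished counter per segment (B's second pass)
theorem pvMain (data : List String) (g : String)
    (genes : PySem.Dict String (PySem.Dict String Int)) :
    (data.foldl pvStepA (some g, genes.insert g PySem.Dict.empty)).2
      = ((g, ((data.takeWhile pvNoHdr).map String.toList).flatten)
          :: pvSegments (data.dropWhile pvNoHdr)).foldl pvIns genes := by
  have hsplit := List.takeWhile_append_dropWhile (p := pvNoHdr) (l := data)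
  have hc : ∀ chars : List Char,
      PySem.Dict.counter (chars.map pvSing) = chars.foldl pvChar PySem.Dict.empty := by
    intro chars; simp only [PySem.Dict.counter, List.foldl_map]; rfl
  rcases hdrop : data.dropWhile pvNoHdr with _ | ⟨l, rest⟩
  · -- no further header: the whole remainder is g's chunk
    have hall : ∀ l ∈ data, pvNoHdr l = true := List.dropWhile_eq_nil_iff.mp hdrop
    have htake : data.takeWhile pvNoHdr = data := List.takeWhile_eq_self_iff.mpr hall
    rw [pvChunkA data hall g genes PySem.Dict.empty, htake]
    simp only [pvSegments, List.foldl_cons, List.foldl_nil, pvIns, hc]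
  · -- next header l: finish g's counter, open l[1:], recurse
    have hl : PySem.Str.isIn ">" l = true := by
      have := List.head_dropWhile_not (p := pvNoHdr) (l := data) (by simp [hdrop])
      simp [hdrop, pvNoHdr] at this; exact this
    have hlen : rest.length < data.length := by
      have h1 := congrArg List.length hsplit
      rw [hdrop] at h1; simp [List.length_append] at h1; omega
    have hstep : pvStepA (some g, genes.insert g
          (((data.takeWhile pvNoHdr).map String.toList).flatten.foldl pvChar
            PySem.Dict.empty)) l
        = (some (PySem.Str.slice l (some 1) none),
            (genes.insert g
              (((data.takeWhile pvNoHdr).map String.toList).flatten.foldl pvChar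
                PySem.Dict.empty)).insert (PySem.Str.slice l (some 1) none)
              PySem.Dict.empty) := by
      simp only [pvStepA, hl]; rfl
    conv_lhs => rw [← hsplit, hdrop, List.foldl_append,
      pvChunkA _ (fun x hx => List.mem_takeWhile_imp (l := data) hx) g genes
        PySem.Dict.empty, List.foldl_cons, hstep]
    rw [pvMain rest (PySem.Str.slice l (some 1) none) _]
    simp only [pvSegments, List.foldl_cons, pvIns, hc]
termination_by data.length

-- A's loop ignores the (all-empty, by Pre_) preamble before the first header
theorem pvPreamble (pre : List String) (hpre : ∀ l ∈ pre, l = "")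
    (d : PySem.Dict String (PySem.Dict String Int)) :
    pre.foldl pvStepA (none, d) = (none, d) := by
  induction pre with
  | nil => rfl
  | cons l ls ih =>
    have hl : l = "" := hpre l (List.mem_cons_self ..)
    have : pvStepA (none, d) l = (none, d) := by
      subst hl; simp [pvStepA]; decide
    rw [List.foldl_cons, this]
    exact ih (fun x hx => hpre x (List.mem_cons_of_mem _ hx))

-- ===== VERDICT (by name: the statement is the Claim_ definition above) =====
theorem number_of_nucleotides_spec : Claim_equal_number_of_nucleotides := by
  intro data _ hpre
  unfold Spec_number_of_nucleotides number_of_nucleotides number_of_nucleotides_alt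
  have hsplit := List.takeWhile_append_dropWhile (p := pvNoHdr) (l := data)
  have hpre' : ∀ l ∈ data.takeWhile pvNoHdr, l = "" := by
    intro l hl
    have := List.all_eq_true.mp hpre l (by simpa [pvNoHdr] using hl)
    simpa using this
  conv_lhs => rw [← hsplit, List.foldl_append, pvPreamble _ hpre' _]
  rcases hdrop : data.dropWhile pvNoHdr with _ | ⟨l, rest⟩
  · simp [pvSegments]
  · have hl : PySem.Str.isIn ">" l = true := by
      have := List.head_dropWhile_not (p := pvNoHdr) (l := data) (by simp [hdrop])
      simp [hdrop, pvNoHdr] at this; exact this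
    have hstep : pvStepA (none, PySem.Dict.empty) l
        = (some (PySem.Str.slice l (some 1) none),
            PySem.Dict.empty.insert (PySem.Str.slice l (some 1) none) PySem.Dict.empty) := by
      simp only [pvStepA, hl]; rfl
    rw [List.foldl_cons, hstep,
      pvMain rest (PySem.Str.slice l (some 1) none) PySem.Dict.empty]
    have hfun : (fun (d : PySem.Dict String (PySem.Dict String Int))
        (p : String × List Char) => d.insert p.1 (PySem.Dict.counter (p.2.map pvSing)))
        = pvIns := by funext d p; rfl
    rw [hfun]
    simp only [pvSegments, List.foldl_cons, pvIns]
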